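-- pv_equiv track=rewrite | github.com/IsakovBoris/Python_Base_1 | Isakov_Boris_dz_1 — копия/Task_1_2.py | sum_list_1
-- ===== SOURCE A (Python) =====
-- def sum_list_1(dataset: list) -> int:
--     """Вычисляет сумму чисел списка dataset, сумма цифр которых делится нацело на 7"""
--     index_list = 0 #индекс для перебора элементов списка
--     unit_total = 0 #переменная, в которую записывается сумма цифр, проверяемого числа
--     final_result = 0 #переменная, для сложения элементов списка, удовлетворяющих условию задания
--     while index_list < len(dataset): #цикл проверки элементов списка
--         number_check = dataset[index_list] #переменная, которой присвается значение элемента для проверки условия суммы цифр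
--         while number_check > 0: #цикл разбития числа на цифры и подсчет суммы этих цифр
--             unit_number = number_check % 10
--             unit_total = unit_total + unit_number
--             number_check = number_check // 10
--         if unit_total % 7 == 0: #условие, при котором элемент из списка записывается для итогового сложения
--             final_result = final_result + dataset[index_list]
--         unit_total = 0 #обнуление переменной суммы цифр для избежания дублирования
--         index_list += 1
--     return final_result
-- ===== SOURCE B (Python) =====
-- def sum_list_1(dataset: list) -> int:
--     """Sums elements whose digit sum is divisible by 7 (n <= 0 counts as digit-sum 0, as in A).
--
--     Digit sum computed by the cumulative-quotient identity
--     digit_sum(n) = n - 9 * sum(n // 10**k for k >= 1), no digit extraction at all."""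
--     def digit_sum(n):
--         q, p = 0, 10
--         while p <= n:
--             q += n // p
--             p *= 10
--         return n - 9 * q if n > 0 else 0
--     return sum(n for n in dataset if digit_sum(n) % 7 == 0)
-- ===== Notes on version B (the rewrite author's own statement) =====
-- stated objective: alternative
-- what changed: Replaces the digit-extraction inner loop (%10 and //10 peeling with a shared accumulator) by the telescoping cumulative-quotient identity digit_sum(n) = n - 9*sum(n//10**k for k>=1), a loop over powers of ten that never extracts a digit, and folds the index-driven outer while into a generator-sum (n<=0 kept as digit-sum 0, exactly as in A).
import Mathlib
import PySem

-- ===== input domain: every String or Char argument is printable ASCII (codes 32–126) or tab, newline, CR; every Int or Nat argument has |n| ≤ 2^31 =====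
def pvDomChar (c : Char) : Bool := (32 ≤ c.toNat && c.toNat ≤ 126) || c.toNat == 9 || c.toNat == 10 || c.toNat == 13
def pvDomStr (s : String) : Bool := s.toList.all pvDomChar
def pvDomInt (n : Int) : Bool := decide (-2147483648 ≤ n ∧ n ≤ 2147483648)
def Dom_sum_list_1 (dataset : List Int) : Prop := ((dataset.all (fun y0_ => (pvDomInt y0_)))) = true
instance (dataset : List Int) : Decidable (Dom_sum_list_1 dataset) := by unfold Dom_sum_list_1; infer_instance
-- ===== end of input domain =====

-- B replaces A's digit-extraction inner loop and index-while by a comprehension sum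
-- whose digit sum uses the cumulative-quotient identity ds(n) = n - 9*Σ n//10^k (alternative; same cost).


-- ===== PORT A =====
-- inner 'while number_check > 0' loop: unit_total accumulates number_check % 10
def pvInnerA (unit_total : Int) (number_check : Int) : Int :=
  if h : number_check > 0 then
    pvInnerA (unit_total + PySem.Int.mod number_check 10)
      (PySem.Int.floordiv number_check 10)
  else unit_total
termination_by number_check.toNat
decreasing_by
  have := PySem.Int.floordiv_eq_ediv_of_pos (a := number_check) (b := 10) (by omega)
  rw [this]; omega

-- outer 'while index_list < len(dataset)' loop
def pvOuterA (dataset : List Int) (index_list : Nat) (final_result : Int) : Int :=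
  if h : index_list < dataset.length then
    let number_check := dataset[index_list]
    let unit_total := pvInnerA 0 number_check
    let final_result' :=
      if PySem.Int.mod unit_total 7 = 0 then final_result + dataset[index_list]
      else final_result
    pvOuterA dataset (index_list + 1) final_result'
  else final_result
termination_by dataset.length - index_list

def sum_list_1 (dataset : List Int) : Int := pvOuterA dataset 0 0

-- ===== PORT B =====
-- 'while p <= n: q += n // p; p *= 10' (the proof argument 0 < p only justifies termination)
def pvQuotB (n q p : Int) (hp : 0 < p) : Int :=
  if p ≤ n then pvQuotB n (q + PySem.Int.floordiv n p) (p * 10) (by positivity)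
  else q
termination_by (n + 1 - p).toNat
decreasing_by omega

-- digit_sum(n) = n - 9*q if n > 0 else 0
def pvDigitSumB (n : Int) : Int :=
  if n > 0 then n - 9 * pvQuotB n 0 10 (by norm_num) else 0

def sum_list_1_alt (dataset : List Int) : Int :=
  (dataset.filter (fun n => PySem.Int.mod (pvDigitSumB n) 7 = 0)).sum

-- ===== PRECONDITION & SPEC =====
def Spec_sum_list_1 (dataset : List Int) (out : Int) : Prop := out = sum_list_1_alt dataset
instance (dataset : List Int) (out : Int) : Decidable (Spec_sum_list_1 dataset out) := by unfold Spec_sum_list_1; infer_instance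

-- ===== CLAIM (what is proved, stated in full; the proofs are below) =====
def Claim_equal_sum_list_1 : Prop := ∀ (dataset : List Int), Dom_sum_list_1 dataset → Spec_sum_list_1 dataset (sum_list_1 dataset)

-- ===== LEMMAS AND PROOFS =====

-- proof-side arithmetic digit sum of a natural number
def pvNatDS (m : Nat) : Int :=
  if m = 0 then 0 else (m % 10 : Nat) + pvNatDS (m / 10)

lemma pvInnerA_eq_natDS (k : Nat) : ∀ (acc n : Int), n.toNat ≤ k →
    pvInnerA acc n = acc + pvNatDS n.toNat := by
  induction k with
  | zero =>
    intro acc n h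
    rw [pvInnerA]
    have hn : ¬ n > 0 := by omega
    simp [hn, Nat.le_zero.mp h, pvNatDS]
  | succ k ih =>
    intro acc n h
    rw [pvInnerA]
    by_cases hn : n > 0
    · have h10 : (0:Int) < 10 := by omega
      rw [dif_pos hn, PySem.Int.mod_eq_emod_of_pos (a := n) (b := 10) h10,
          PySem.Int.floordiv_eq_ediv_of_pos (a := n) (b := 10) h10]
      have hd : (n / 10).toNat = n.toNat / 10 := by omega
      rw [ih _ _ (by omega), hd]
      have hnz : n.toNat ≠ 0 := by omega
      conv_rhs => rw [pvNatDS, if_neg hnz]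
      have hm : n % 10 = ((n.toNat % 10 : Nat) : Int) := by omega
      rw [hm]; ring
    · simp [hn]
      have : n.toNat = 0 := by omega
      simp [this, pvNatDS]

-- proof-side Nat version of B's power-of-ten quotient sum
def pvFN (n p : Nat) : Int :=
  if h : p ≤ n ∧ 0 < p then (n / p : Nat) + pvFN n (p * 10) else 0
termination_by n + 1 - p

lemma pvQuotB_eq_pvFN (k : Nat) : ∀ (n q p : Int) (hp : 0 < p), (n + 1 - p).toNat ≤ k →
    pvQuotB n q p hp = q + pvFN n.toNat p.toNat := by
  induction k with
  | zero =>
    intro n q p hp h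
    rw [pvQuotB]
    have hnp : ¬ p ≤ n := by omega
    rw [if_neg hnp, pvFN, dif_neg (by omega)]; ring
  | succ k ih =>
    intro n q p hp h
    rw [pvQuotB]
    by_cases hnp : p ≤ n
    · rw [if_pos hnp, ih _ _ _ _ (by omega)]
      have hdiv : PySem.Int.floordiv n p = ((n.toNat / p.toNat : Nat) : Int) := by
        rw [PySem.Int.floordiv_eq_ediv_of_pos (a := n) (b := p) hp]
        have hcast : ((n.toNat / p.toNat : Nat) : Int) = (n.toNat : Int) / (p.toNat : Int) := by
          push_cast; ring
        rw [hcast]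
        congr 1 <;> omega
      conv_rhs => rw [pvFN, dif_pos ⟨by omega, by omega⟩]
      have hpt : (p * 10).toNat = p.toNat * 10 := by omega
      rw [hdiv, hpt]; ring
    · rw [if_neg hnp, pvFN, dif_neg (by omega)]; ring

lemma pvFN_shift (k : Nat) : ∀ (n p : Nat), 0 < p → n + 1 - p * 10 ≤ k →
    pvFN n (p * 10) = pvFN (n / p) 10 := by
  induction k with
  | zero =>
    intro n p hp h
    rw [pvFN, dif_neg (by omega), pvFN, dif_neg ?_]
    rintro ⟨h10, -⟩
    have := (Nat.le_div_iff_mul_le hp).mp h10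
    omega
  | succ k ih =>
    intro n p hp h
    conv_lhs => rw [pvFN]
    conv_rhs => rw [pvFN]
    by_cases hc : p * 10 ≤ n
    · have h10 : 10 ≤ n / p := (Nat.le_div_iff_mul_le hp).mpr (by omega)
      rw [dif_pos ⟨hc, by omega⟩, dif_pos ⟨h10, by omega⟩]
      have hnest : n / (p * 10) = n / p / 10 := (Nat.div_div_eq_div_mul n p 10).symm
      have hkey : n / p + 10 * (p - 1) ≤ n := by
        have hdm : n / p * p ≤ n := Nat.div_mul_le_self n p
        have hmul : 10 * (p - 1) ≤ n / p * (p - 1) := Nat.mul_le_mul_right (p - 1) h10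
        have hsplit : n / p * p = n / p * (p - 1) + n / p := by
          have hp1 : p = (p - 1) + 1 := by omega
          calc n / p * p = n / p * ((p - 1) + 1) := by rw [← hp1]
            _ = n / p * (p - 1) + n / p := by ring
        omega
      have hrec : pvFN n (p * 10 * 10) = pvFN (n / p) (10 * 10) := by
        have h1 : pvFN n (p * 10 * 10) = pvFN (n / (p * 10)) 10 :=
          ih n (p * 10) (by omega) (by omega)
        have h2 : pvFN (n / p) (10 * 10) = pvFN (n / p / 10) 10 :=
          ih (n / p) 10 (by omega) (by omega)
        rw [h1, h2, hnest]
      rw [hnest, hrec]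
    · have h10 : ¬ 10 ≤ n / p := by
        intro h10
        have := (Nat.le_div_iff_mul_le hp).mp h10
        omega
      rw [dif_neg (by omega), dif_neg (by omega)]

lemma pvFN_ten (n : Nat) : pvFN n 10 = (n / 10 : Nat) + pvFN (n / 10) 10 := by
  rw [pvFN]
  by_cases hc : 10 ≤ n
  · rw [dif_pos ⟨hc, by omega⟩, pvFN_shift (n + 1) n 10 (by omega) (by omega)]
  · rw [dif_neg (by omega)]
    have h0 : n / 10 = 0 := by omega
    rw [h0, pvFN, dif_neg (by omega)]
    simp

lemma pvFN_ds (n : Nat) : (n : Int) - 9 * pvFN n 10 = pvNatDS n := by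
  induction n using Nat.strong_induction_on with
  | _ n ih =>
    by_cases h0 : n = 0
    · subst h0
      rw [pvFN, dif_neg (by omega), pvNatDS]
      simp
    · rw [pvFN_ten, pvNatDS, if_neg h0, ← ih (n / 10) (by omega)]
      have h1 : n = 10 * (n / 10) + n % 10 := (Nat.div_add_mod' n 10).symm.trans (by ring)
      have h2 : ((n : Int)) = 10 * ((n / 10 : Nat) : Int) + ((n % 10 : Nat) : Int) := by
        exact_mod_cast congrArg (Nat.cast : Nat → Int) h1
      rw [h2]; ring

lemma pvDigitSumB_eq_natDS (n : Int) : pvDigitSumB n = pvNatDS n.toNat := by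
  unfold pvDigitSumB
  by_cases hn : n > 0
  · rw [if_pos hn,
      pvQuotB_eq_pvFN (n + 1 - 10).toNat n 0 10 (by norm_num) (le_refl _), zero_add]
    have h10 : ((10 : Int)).toNat = 10 := by decide
    rw [h10, ← pvFN_ds n.toNat]
    have : ((n.toNat : Nat) : Int) = n := by omega
    rw [this]
  · rw [if_neg hn]
    have : n.toNat = 0 := by omega
    simp [this, pvNatDS]

lemma pvInnerA_eq_digitSumB (n : Int) : pvInnerA 0 n = pvDigitSumB n := by
  rw [pvInnerA_eq_natDS n.toNat 0 n le_rfl, pvDigitSumB_eq_natDS, zero_add]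

lemma pvOuterA_eq (dataset : List Int) : ∀ (i : Nat) (acc : Int),
    pvOuterA dataset i acc
      = acc + ((dataset.drop i).filter
          (fun n => PySem.Int.mod (pvDigitSumB n) 7 = 0)).sum := by
  intro i
  induction hk : dataset.length - i generalizing i with
  | zero =>
    intro acc
    rw [pvOuterA]
    have h : ¬ i < dataset.length := by omega
    rw [dif_neg h, List.drop_of_length_le (by omega)]
    simp
  | succ k ih =>
    intro acc
    rw [pvOuterA]
    have h : i < dataset.length := by omega
    rw [dif_pos h]
    simp only [pvInnerA_eq_digitSumB]
    have hdrop : dataset.drop i = dataset[i] :: dataset.drop (i + 1) :=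
      List.drop_eq_getElem_cons h
    rw [ih (i + 1) (by omega)]
    rw [hdrop, List.filter_cons]
    simp only [PySem.Int.mod_eq_zero_iff_dvd]
    by_cases hc : (7:Int) ∣ pvDigitSumB dataset[i]
    · simp only [hc, if_pos, decide_true, List.sum_cons]; ring
    · simp [hc]

-- ===== VERDICT (by name: the statement is the Claim_ definition above) =====
theorem sum_list_1_spec : Claim_equal_sum_list_1 := by
  intro dataset _
  unfold Spec_sum_list_1 sum_list_1 sum_list_1_alt
  rw [pvOuterA_eq dataset 0 0]
  simp
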